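-- pv_equiv track=rewrite | github.com/OuterRef/ProjectEulerProblems | problem43.py | gen_pandigital
-- ===== SOURCE A (Python) =====
-- def gen_pandigital(s_num, digit_list):
--     ans = []
--     if sum(digit_list) == 0: return [s_num]
--     for digit, spare in enumerate(digit_list):
--         if spare and not (s_num == '' and digit == 0):
--             new_list = [*digit_list]
--             new_list[digit] = False
--             ans += gen_pandigital(s_num+str(digit), new_list)
--     return ans
-- ===== SOURCE B (Python) =====
-- def gen_pandigital(s_num, digit_list):
--     # iterative depth-first search with an explicit stack instead of recursion
--     stack = [(s_num, digit_list)]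
--     ans = []
--     while stack:
--         s, dl = stack.pop()
--         if sum(dl) == 0:
--             ans.append(s)
--             continue
--         for d in reversed(range(len(dl))):
--             if dl[d] and not (s == '' and d == 0):
--                 stack.append((s + str(d), dl[:d] + [0] + dl[d + 1:]))
--     return ans
-- ===== Notes on version B (the rewrite author's own statement) =====
-- stated objective: alternative
-- what changed: Replaces A's per-call recursion (which rebuilds and concatenates child result lists at every level) by an iterative depth-first search over an explicit stack of (prefix, remaining-digits) frames that appends each finished string once to a single answer list.
import Mathlib
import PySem

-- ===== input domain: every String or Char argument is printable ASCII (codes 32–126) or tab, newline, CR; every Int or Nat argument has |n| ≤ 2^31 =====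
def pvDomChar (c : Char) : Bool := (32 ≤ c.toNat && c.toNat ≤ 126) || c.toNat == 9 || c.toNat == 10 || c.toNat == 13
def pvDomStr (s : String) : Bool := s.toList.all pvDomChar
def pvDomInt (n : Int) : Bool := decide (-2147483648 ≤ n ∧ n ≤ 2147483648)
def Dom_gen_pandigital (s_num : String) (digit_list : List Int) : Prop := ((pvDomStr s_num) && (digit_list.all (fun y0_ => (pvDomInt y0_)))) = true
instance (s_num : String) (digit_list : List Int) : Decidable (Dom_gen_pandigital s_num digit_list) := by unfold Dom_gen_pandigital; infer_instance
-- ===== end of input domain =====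

-- B replaces A's recursion by an iterative explicit-stack depth-first search (alternative decomposition, same cost).

-- number of nonzero ("spare") entries; used only as the termination measure of both ports
def pvNZ (l : List Int) : Nat := l.countP (fun x => decide (x ≠ 0))

theorem pvNZ_set_lt (l : List Int) (d : Nat) (h : d < l.length) (hne : l[d] ≠ 0) :
    pvNZ (l.set d 0) < pvNZ l := by
  induction l generalizing d with
  | nil => simp at h
  | cons a t ih =>
    cases d with
    | zero =>
      simp only [List.set_cons_zero, pvNZ, List.countP_cons]
      simp only [List.getElem_cons_zero] at hne
      simp [hne]
    | succ d =>
      simp only [List.set_cons_succ, pvNZ, List.countP_cons]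
      simp only [List.getElem_cons_succ] at hne
      have := ih d (by simpa using h) hne
      simp only [pvNZ] at this
      omega

theorem pvNZ_pos_of_sum_ne (l : List Int) (h : l.sum ≠ 0) : 1 ≤ pvNZ l := by
  by_contra hc
  have h0 : pvNZ l = 0 := by omega
  have : ∀ x ∈ l, x = 0 := by
    intro x hx
    have := (List.countP_eq_zero.mp h0) x hx
    simpa using this
  exact h (List.sum_eq_zero this)

-- ===== PORT A =====
-- Python's `new_list[digit] = False` is exact as setting the entry to 0: the entry is
-- only ever used as a truthiness test and inside sum(), and False == 0 in Python arithmetic.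
mutual
def gen_pandigital (s_num : String) (digit_list : List Int) : List String :=
  if digit_list.sum = 0 then [s_num]
  else pvALoop s_num digit_list 0
termination_by (pvNZ digit_list, digit_list.length + 2)
decreasing_by
  apply Prod.Lex.right
  omega

-- the `for digit, spare in enumerate(digit_list)` loop of A, accumulating `ans` by concatenation
def pvALoop (s : String) (dl : List Int) (d : Nat) : List String :=
  if h : d < dl.length then
    (if dl[d] ≠ 0 ∧ ¬(s = "" ∧ d = 0) then
       gen_pandigital (s ++ PySem.Int.toStr (d : Int)) (dl.set d 0)
     else []) ++ pvALoop s dl (d + 1)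
  else []
termination_by (pvNZ dl, dl.length + 1 - d)
decreasing_by
  · apply Prod.Lex.left
    have hc : dl[d] ≠ 0 ∧ ¬(s = "" ∧ d = 0) := by assumption
    exact pvNZ_set_lt dl d h hc.1
  · apply Prod.Lex.right
    omega
end

-- ===== PORT B =====
-- the frames pushed while scanning `reversed(range(len(dl)))`: since the Lean stack keeps its
-- top at the head, the pushed frames appear head-first in ascending digit order
def pvBChildren (s : String) (dl : List Int) (d : Nat) : List (String × List Int) :=
  if h : d < dl.length then
    (if dl[d] ≠ 0 ∧ ¬(s = "" ∧ d = 0) then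
       [(s ++ PySem.Int.toStr (d : Int), dl.take d ++ [0] ++ dl.drop (d + 1))]
     else [])
      ++ pvBChildren s dl (d + 1)
  else []
termination_by dl.length - d

-- termination measure of the while loop
def pvMu (stack : List (String × List Int)) : Nat :=
  (stack.map (fun p => (p.2.length + 1) ^ pvNZ p.2)).sum

theorem pvBChildren_mu_le (s : String) (dl : List Int) (d : Nat) :
    pvMu (pvBChildren s dl d) ≤ (dl.length - d) * (dl.length + 1) ^ (pvNZ dl - 1) := by
  by_cases h : d < dl.length
  · rw [pvBChildren]
    simp only [h, dif_pos]
    split_ifs with hc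
    · have hlt := pvNZ_set_lt dl d h hc.1
      have hset : dl.take d ++ [0] ++ dl.drop (d + 1) = dl.set d 0 := by
        rw [List.set_eq_take_append_cons_drop, if_pos h]; simp
      have ih := pvBChildren_mu_le s dl (d + 1)
      simp only [pvMu, List.map_append, List.sum_append, List.map_cons, List.map_nil,
        List.sum_cons, List.sum_nil, hset]
      have hlen : (dl.set d 0).length = dl.length := by simp
      have hpow : (dl.length + 1) ^ pvNZ (dl.set d 0) ≤ (dl.length + 1) ^ (pvNZ dl - 1) :=
        Nat.pow_le_pow_right (by omega) (by omega)
      simp only [pvMu] at ih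
      rw [hlen]
      have : (dl.length - d) = (dl.length - (d + 1)) + 1 := by omega
      rw [this, Nat.succ_mul]
      omega
    · have ih := pvBChildren_mu_le s dl (d + 1)
      simpa using Nat.le_trans ih (Nat.mul_le_mul_right _ (by omega))
  · rw [pvBChildren]
    simp [h, pvMu]
termination_by dl.length - d

theorem pvBChildren_mu_lt (s : String) (dl : List Int) (h : dl.sum ≠ 0) :
    pvMu (pvBChildren s dl 0) < (dl.length + 1) ^ pvNZ dl := by
  have h1 := pvBChildren_mu_le s dl 0
  have h2 := pvNZ_pos_of_sum_ne dl h
  have h3 : (dl.length - 0) * (dl.length + 1) ^ (pvNZ dl - 1)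
      < (dl.length + 1) * (dl.length + 1) ^ (pvNZ dl - 1) := by
    have hp : 0 < (dl.length + 1) ^ (pvNZ dl - 1) := Nat.pow_pos (by omega)
    exact (Nat.mul_lt_mul_right hp).mpr (by omega)
  have h4 : (dl.length + 1) * (dl.length + 1) ^ (pvNZ dl - 1) = (dl.length + 1) ^ pvNZ dl := by
    rw [← pow_succ']
    congr 1
    omega
  omega

-- the `while stack:` loop; head of the list is the top of the Python stack
def pvBLoop (stack : List (String × List Int)) (ans : List String) : List String :=
  match stack with
  | [] => ans
  | (s, dl) :: rest =>
    if dl.sum = 0 then pvBLoop rest (ans ++ [s])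
    else pvBLoop (pvBChildren s dl 0 ++ rest) ans
termination_by pvMu stack
decreasing_by
  · simp only [pvMu, List.map_cons, List.sum_cons]
    have : 1 ≤ (dl.length + 1) ^ pvNZ dl := Nat.pow_pos (by omega)
    omega
  · simp only [pvMu, List.map_cons, List.sum_cons, List.map_append, List.sum_append]
    have := pvBChildren_mu_lt s dl (by assumption)
    simp only [pvMu] at this
    omega

def gen_pandigital_alt (s_num : String) (digit_list : List Int) : List String :=
  pvBLoop [(s_num, digit_list)] []

-- ===== PRECONDITION & SPEC =====
def Spec_gen_pandigital (s_num : String) (digit_list : List Int) (out : List String) : Prop := out = gen_pandigital_alt s_num digit_list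
instance (s_num : String) (digit_list : List Int) (out : List String) : Decidable (Spec_gen_pandigital s_num digit_list out) := by unfold Spec_gen_pandigital; infer_instance

-- ===== CLAIM (what is proved, stated in full; the proofs are below) =====
def Claim_equal_gen_pandigital : Prop := ∀ (s_num : String) (digit_list : List Int), Dom_gen_pandigital s_num digit_list → Spec_gen_pandigital s_num digit_list (gen_pandigital s_num digit_list)

-- ===== LEMMAS AND PROOFS =====

-- the frames pushed for (s, dl) expand, frame by frame, to exactly what A's digit loop returns
theorem pvALoop_eq_flatMap (s : String) (dl : List Int) (d : Nat) :
    pvALoop s dl d = (pvBChildren s dl d).flatMap (fun p => gen_pandigital p.1 p.2) := by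
  by_cases h : d < dl.length
  · rw [pvALoop, pvBChildren]
    simp only [h, dif_pos]
    have ih := pvALoop_eq_flatMap s dl (d + 1)
    split_ifs with hc
    · have hset : dl.take d ++ [0] ++ dl.drop (d + 1) = dl.set d 0 := by
        rw [List.set_eq_take_append_cons_drop, if_pos h]; simp
      simp [hset, ih]
    · simp [ih]
  · rw [pvALoop, pvBChildren]
    simp [h]
termination_by dl.length - d

-- loop invariant: the while loop flushes the stack, appending each frame's recursive result
theorem pvBLoop_eq (stack : List (String × List Int)) (ans : List String) :
    pvBLoop stack ans = ans ++ stack.flatMap (fun p => gen_pandigital p.1 p.2) := by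
  induction stack, ans using pvBLoop.induct with
  | case1 ans => simp [pvBLoop]
  | case2 ans s dl rest hsum ih =>
    rw [pvBLoop]
    simp only [hsum, if_pos]
    rw [ih]
    have : gen_pandigital s dl = [s] := by rw [gen_pandigital]; simp [hsum]
    simp [this]
  | case3 ans s dl rest hsum ih =>
    rw [pvBLoop]
    simp only [hsum, ite_false]
    rw [ih]
    have : gen_pandigital s dl = (pvBChildren s dl 0).flatMap (fun p => gen_pandigital p.1 p.2) := by
      rw [gen_pandigital]
      simp [hsum, pvALoop_eq_flatMap]
    simp [this]

-- ===== VERDICT (by name: the statement is the Claim_ definition above) =====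
theorem gen_pandigital_spec : Claim_equal_gen_pandigital := by
  intro s_num digit_list _
  unfold Spec_gen_pandigital gen_pandigital_alt
  rw [pvBLoop_eq]
  simp
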